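-- pv_equiv track=rewrite | github.com/benedict-weiss/5420-multimodal | src/attention_analysis.py | resolve_marker_alias
-- ===== SOURCE A (Python) =====
-- from typing import Optional
--
-- def resolve_marker_alias(marker_name: str, token_names: list[str]) -> Optional[str]:
--     """
--     Map a canonical marker name to the concrete token name used by the ADT panel.
--
--     Prefers exact matches, then common panel suffix forms like CD4-1.
--     Returns None when no plausible token exists.
--     """
--     if marker_name in token_names:
--         return marker_name
--
--     prefix_matches = [name for name in token_names if name.startswith(f"{marker_name}-")]
--     if len(prefix_matches) == 1:
--         return prefix_matches[0]
--     if len(prefix_matches) > 1: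
--         return sorted(prefix_matches)[0]
--
--     return None
-- ===== SOURCE B (Python) =====
-- def resolve_marker_alias(marker_name, token_names):
--     prefix = marker_name + "-"
--     best = None
--     for name in token_names:
--         if name == marker_name:
--             return marker_name
--         if name.startswith(prefix) and (best is None or name < best):
--             best = name
--     return best
-- ===== Notes on version B (the rewrite author's own statement) =====
-- stated objective: faster
-- what changed: Replaces the membership scan + list comprehension + length branching + sorted(...)[0] with a single left-to-right scan that returns on an exact match and otherwise keeps the lexicographically smallest prefix match as a running minimum.
import Mathlib
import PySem

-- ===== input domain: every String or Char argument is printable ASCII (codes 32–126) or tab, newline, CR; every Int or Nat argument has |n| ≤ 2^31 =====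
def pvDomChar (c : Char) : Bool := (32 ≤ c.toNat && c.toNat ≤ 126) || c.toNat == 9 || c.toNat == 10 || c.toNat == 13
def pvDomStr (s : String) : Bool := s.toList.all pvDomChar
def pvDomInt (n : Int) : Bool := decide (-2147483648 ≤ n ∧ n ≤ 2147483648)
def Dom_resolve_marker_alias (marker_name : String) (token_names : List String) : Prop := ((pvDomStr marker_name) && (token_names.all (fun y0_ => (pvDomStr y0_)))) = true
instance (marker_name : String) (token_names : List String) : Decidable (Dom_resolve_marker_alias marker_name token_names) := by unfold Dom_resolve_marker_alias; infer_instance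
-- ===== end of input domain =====

-- B replaces A's membership scan + comprehension + length branching + sorted(...)[0]
-- by one pass keeping a running lexicographic minimum of the prefix matches (simpler).

-- ===== PORT A =====
def resolve_marker_alias (marker_name : String) (token_names : List String) : Option String :=
  if token_names.contains marker_name then some marker_name
  else
    let prefix_matches := token_names.filter (fun name => PySem.Str.startswith name (marker_name ++ "-"))
    if prefix_matches.length == 1 then PySem.List.pyGet? prefix_matches 0
    else if prefix_matches.length > 1 then PySem.List.pyGet? (PySem.List.sorted prefix_matches (fun x => x) false) 0
    else none

-- ===== PORT B =====
def pvAltLoop (marker pre : String) : Option String → List String → Option String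
  | best, [] => best
  | best, name :: rest =>
    if name == marker then some marker
    else if PySem.Str.startswith name pre
            && (match best with | none => true | some b => decide (name < b)) then
      pvAltLoop marker pre (some name) rest
    else
      pvAltLoop marker pre best rest

def resolve_marker_alias_alt (marker_name : String) (token_names : List String) : Option String :=
  pvAltLoop marker_name (marker_name ++ "-") none token_names

-- ===== PRECONDITION & SPEC =====
def Spec_resolve_marker_alias (marker_name : String) (token_names : List String) (out : Option String) : Prop := out = resolve_marker_alias_alt marker_name token_names
instance (marker_name : String) (token_names : List String) (out : Option String) : Decidable (Spec_resolve_marker_alias marker_name token_names out) := by unfold Spec_resolve_marker_alias; infer_instance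

-- ===== CLAIM (what is proved, stated in full; the proofs are below) =====
def Claim_equal_resolve_marker_alias : Prop := ∀ (marker_name : String) (token_names : List String), Dom_resolve_marker_alias marker_name token_names → Spec_resolve_marker_alias marker_name token_names (resolve_marker_alias marker_name token_names)

-- ===== LEMMAS AND PROOFS =====

-- the step function of B's loop, restricted to the elements that pass the prefix test
def pvMinStep (b : Option String) (name : String) : Option String :=
  if (match b with | none => true | some x => decide (name < x)) then some name else b

-- if the marker occurs in the list, B's loop returns it
theorem pvAltLoop_of_mem (m p : String) (best : Option String) (ts : List String)
    (h : m ∈ ts) : pvAltLoop m p best ts = some m := by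
  induction ts generalizing best with
  | nil => cases h
  | cons x rest ih =>
    by_cases hx : x = m
    · simp [pvAltLoop, hx]
    · rcases List.mem_cons.mp h with h | h
      · exact absurd h.symm hx
      · simp only [pvAltLoop, beq_iff_eq, hx, if_false]
        split <;> (try split) <;> exact ih _ h

-- if the marker does not occur, B's loop is a fold of pvMinStep over the prefix matches
theorem pvAltLoop_of_not_mem (m p : String) (best : Option String) (ts : List String)
    (h : m ∈ ts → False) :
    pvAltLoop m p best ts =
      (ts.filter (fun name => PySem.Str.startswith name p)).foldl pvMinStep best := by
  induction ts generalizing best with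
  | nil => rfl
  | cons x rest ih =>
    have hx : ¬ (x = m) := fun e => h (e ▸ List.mem_cons_self ..)
    have hrest : m ∈ rest → False := fun e => h (List.mem_cons_of_mem _ e)
    cases best with
    | none =>
      by_cases hs : PySem.Chars.startswith x.toList p.toList = true
      · simp [pvAltLoop, pvMinStep, hx, hs, ih _ hrest]
      · simp [pvAltLoop, hx, hs, ih _ hrest]
    | some b =>
      by_cases hs : PySem.Chars.startswith x.toList p.toList = true <;>
        by_cases hlt : x.toList < b.toList <;>
          simp [pvAltLoop, pvMinStep, hx, hs, hlt, ih _ hrest]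

-- folding pvMinStep from a known value is the running minimum
theorem pvMinStep_foldl_some (b : String) (xs : List String) :
    xs.foldl pvMinStep (some b) = some (xs.foldl min b) := by
  induction xs generalizing b with
  | nil => rfl
  | cons x t ih =>
    simp only [List.foldl_cons, pvMinStep]
    by_cases hlt : x < b
    · simp [hlt, ih, min_eq_right (le_of_lt hlt)]
    · simp [hlt, ih, min_eq_left (le_of_not_gt hlt)]

-- folding pvMinStep from none over a nonempty list is Python's min()
theorem pvMinStep_foldl_none (x : String) (t : List String) :
    (x :: t).foldl pvMinStep none = PySem.List.min? (x :: t) (fun y => y) := by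
  simp only [List.foldl_cons, pvMinStep, PySem.List.min?_id_cons]
  exact pvMinStep_foldl_some x t

-- the head of sorted(xs) is min(xs)
theorem pyGet?_sorted_zero (x : String) (t : List String) :
    PySem.List.pyGet? (PySem.List.sorted (x :: t) (fun y => y) false) 0 =
      PySem.List.min? (x :: t) (fun y => y) := by
  rcases hs : PySem.List.sorted (x :: t) (fun y => y) false with _ | ⟨h, s⟩
  · exact absurd ((PySem.List.sorted_eq_nil_iff (x :: t) (fun y => y) false).mp hs) (by simp)
  · rcases hm : PySem.List.min? (x :: t) (fun y => y) with _ | m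
    · exact absurd ((PySem.List.min?_eq_none_iff (x :: t) (fun y => y)).mp hm) (by simp)
    · have hhead : h ∈ (x :: t) := by
        have := PySem.List.mem_sorted (x :: t) (fun y => y) false h
        rw [hs] at this
        exact this.mp (List.mem_cons_self ..)
      have hmem : m ∈ (x :: t) := PySem.List.min?_mem hm
      have h1 : h ≤ m := PySem.List.key_head_sorted_le (x :: t) (fun y => y) hs m hmem
      have h2 : m ≤ h := PySem.List.min?_isMin hm h hhead
      have : h = m := le_antisymm h1 h2
      simp [PySem.List.pyGet?, PySem.List.pyIdx?, this]

-- ===== VERDICT (by name: the statement is the Claim_ definition above) =====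
theorem resolve_marker_alias_spec : Claim_equal_resolve_marker_alias := by
  intro m ts _
  show resolve_marker_alias m ts = resolve_marker_alias_alt m ts
  unfold resolve_marker_alias resolve_marker_alias_alt
  by_cases hmem : m ∈ ts
  · rw [pvAltLoop_of_mem m _ none ts hmem, if_pos (by simp [hmem])]
  · rw [if_neg (by simp [hmem]),
        pvAltLoop_of_not_mem m _ none ts (fun h => hmem h)]
    rcases hf : ts.filter (fun name => PySem.Str.startswith name (m ++ "-")) with _ | ⟨x, t⟩
    · rfl
    · rw [pvMinStep_foldl_none x t]
      rcases t with _ | ⟨y, u⟩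
      · simp [PySem.List.pyGet?, PySem.List.pyIdx?, PySem.List.min?]
      · have hlen : ((x :: y :: u).length == 1) = false := by simp
        have hgt : (x :: y :: u).length > 1 := by simp
        simp only [hlen, Bool.false_eq_true, if_false, hgt, if_true]
        exact pyGet?_sorted_zero x (y :: u)
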